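-- pv_equiv track=rewrite | github.com/davidfan1224/CAIL2021_Multi-span_MRC | CailExample.py | group_with_index
-- ===== SOURCE A (Python) =====
-- import itertools
--
-- def group_with_index(l):   # 返回连续片段 索引
--     i = 0
--     res = []
--     for k, vs in itertools.groupby(l):
--         c = sum(1 for _ in vs)
--         # print (k, c, i)
--         res.append([k, c, i])
--         i += c
--     return res
-- ===== SOURCE B (Python) =====
-- def group_with_index(l):
--     # Build the run list back-to-front: walk indices descending, merging each
--     # element into the most recently produced run or starting a new one,
--     # then reverse once to get the runs in ascending-index order.
--     res = []
--     for i in range(len(l) - 1, -1, -1):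
--         if res and res[-1][0] == l[i]:
--             res[-1] = [l[i], res[-1][1] + 1, i]
--         else:
--             res.append([l[i], 1, i])
--     res.reverse()
--     return res
-- ===== Notes on version B (the rewrite author's own statement) =====
-- stated objective: alternative
-- what changed: B builds the run list back-to-front in one descending pass, merging each element into the most recent run and reversing once, instead of groupby's forward grouping with an inner counting loop and a running index offset.
import Mathlib
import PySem

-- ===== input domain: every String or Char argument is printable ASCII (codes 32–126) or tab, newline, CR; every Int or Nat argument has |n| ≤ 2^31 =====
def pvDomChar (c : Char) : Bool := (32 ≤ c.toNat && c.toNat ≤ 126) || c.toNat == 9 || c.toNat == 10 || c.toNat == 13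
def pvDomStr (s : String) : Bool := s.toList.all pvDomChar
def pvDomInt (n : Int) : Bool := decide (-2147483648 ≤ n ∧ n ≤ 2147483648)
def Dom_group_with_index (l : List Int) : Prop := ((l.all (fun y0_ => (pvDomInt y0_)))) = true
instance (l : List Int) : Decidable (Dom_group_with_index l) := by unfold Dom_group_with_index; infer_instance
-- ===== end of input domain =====

-- B builds the run list back-to-front, merging each element into the head run; A groups forward with groupby and incremental counting.

-- ===== PORT A =====
-- itertools.groupby step: number of leading elements equal to x, and the rest.
def pvCountRun (x : Int) : List Int → Nat × List Int
  | [] => (0, [])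
  | y :: ys => if y = x then let p := pvCountRun x ys; (p.1 + 1, p.2) else (0, y :: ys)

theorem pvCountRun_snd_length (x : Int) : ∀ xs : List Int, (pvCountRun x xs).2.length ≤ xs.length := by
  intro xs
  induction xs with
  | nil => simp [pvCountRun]
  | cons y ys ih =>
    by_cases hyx : y = x
    · simp [pvCountRun, hyx]; omega
    · simp [pvCountRun, hyx]

-- the groupby loop of A: k = group key, c = run length (sum over vs), append [k, c, i], i += c
def pvGoA (l : List Int) (i : Int) : List (List Int) :=
  match l with
  | [] => []
  | x :: xs =>
    let p := pvCountRun x xs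
    [x, (p.1 : Int) + 1, i] :: pvGoA p.2 (i + (p.1 : Int) + 1)
termination_by l.length
decreasing_by
  have := pvCountRun_snd_length x xs
  simp
  omega

def group_with_index (l : List Int) : List (List Int) := pvGoA l 0

-- ===== PORT B =====
-- the descending index loop of B, as structural recursion from the tail: the accumulator for
-- index i is built from the one for index i+1. Python appends at the right end of res and reads
-- res[-1]; here that working end is kept at the HEAD of the list (the list is stored already
-- reversed), so Source B's final res.reverse() is absorbed into the representation and each step is
-- the same branch pair: merge into the adjacent run, or start a new run.
def pvGoB : List Int → Int → List (List Int)
  | [], _ => []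
  | x :: xs, i =>
    match pvGoB xs (i + 1) with
    | [y, c, j] :: rest => if y = x then [x, c + 1, i] :: rest else [x, 1, i] :: [y, c, j] :: rest
    | res => [x, 1, i] :: res

def group_with_index_alt (l : List Int) : List (List Int) := pvGoB l 0

-- ===== PRECONDITION & SPEC =====
def Spec_group_with_index (l : List Int) (out : List (List Int)) : Prop := out = group_with_index_alt l
instance (l : List Int) (out : List (List Int)) : Decidable (Spec_group_with_index l out) := by unfold Spec_group_with_index; infer_instance

-- ===== CLAIM (what is proved, stated in full; the proofs are below) =====
def Claim_equal_group_with_index : Prop := ∀ (l : List Int), Dom_group_with_index l → Spec_group_with_index l (group_with_index l)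

-- ===== LEMMAS AND PROOFS =====

-- pvGoB satisfies the run-at-a-time recurrence that defines pvGoA.
theorem pvGoB_cons : ∀ (xs : List Int) (x : Int) (i : Int),
    pvGoB (x :: xs) i =
      [x, ((pvCountRun x xs).1 : Int) + 1, i] :: pvGoB (pvCountRun x xs).2 (i + ((pvCountRun x xs).1 : Int) + 1) := by
  intro xs
  induction xs with
  | nil => intro x i; simp [pvGoB, pvCountRun]
  | cons y ys ih =>
    intro x i
    by_cases h : y = x
    · subst h
      have hy := ih y (i + 1)
      conv_lhs => rw [pvGoB, hy]
      simp only [pvCountRun, if_true]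
      refine congrArg₂ _ ?_ ?_
      · push_cast; ring_nf
      · congr 1
        push_cast; ring
    · have hy := ih y (i + 1)
      simp only [pvCountRun, if_neg h]
      conv_lhs => rw [pvGoB, hy]
      simp only [if_neg h, ← hy]
      norm_num

-- A = B for every list and start index, by strong induction on the length.
theorem pvGoA_eq_pvGoB : ∀ (n : Nat) (l : List Int) (i : Int), l.length ≤ n → pvGoA l i = pvGoB l i := by
  intro n
  induction n with
  | zero =>
    intro l i h
    have : l = [] := by cases l <;> simp_all
    subst this; simp [pvGoA, pvGoB]
  | succ n ih =>
    intro l i h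
    cases l with
    | nil => simp [pvGoA, pvGoB]
    | cons x xs =>
      rw [pvGoA, pvGoB_cons]
      have hlen := pvCountRun_snd_length x xs
      simp only [List.length_cons] at h
      exact congrArg _ (ih _ _ (by omega))

-- ===== VERDICT (by name: the statement is the Claim_ definition above) =====
theorem group_with_index_spec : Claim_equal_group_with_index := by
  intro l _
  unfold Spec_group_with_index group_with_index group_with_index_alt
  exact pvGoA_eq_pvGoB l.length l 0 le_rfl
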